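-- pv_equiv track=rewrite | github.com/Delfiiina/python | clasesLabos/guia7.py | vocales_distintas
-- ===== SOURCE A (Python) =====
-- from typing import List, Dict, Tuple
--
-- def pertenece2 (e:int, s:List [int]) -> bool:
--     mi_numero : int = e
--     mi_lista : List = s
--     for i in range (0,len(mi_lista),1):
--         if mi_lista[i] == mi_numero:
--             return True
--     return False
--
-- def sacar_elemento (lista: list[str], letra: str) -> list[str]:
--     nueva_lista: list[str] = []
--     for i in range (len(lista)):
--         if lista [i] != letra:
--             nueva_lista.append(lista[i])
--     return nueva_lista
--
-- def vocales_distintas (palabra: str) -> bool: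
--     vocales : list [str] = ['a','e','i','o','u','A','E','I','O','U']
--     contador_vocales : int = 0
--     for letra in palabra:
--         if pertenece2 (letra,vocales) == True:
--             contador_vocales += 1
--             vocales = sacar_elemento (vocales, letra)
--     return contador_vocales >= 3
-- ===== SOURCE B (Python) =====
-- def vocales_distintas(palabra: str) -> bool:
--     vocales = set('aeiouAEIOU')
--     return len({c for c in palabra if c in vocales}) >= 3
-- ===== Notes on version B (the rewrite author's own statement) =====
-- stated objective: idiomatic
-- what changed: B collects the distinct vowels of the word with a set comprehension and compares its cardinality with 3, instead of A's loop that shrinks a 10-element vowel list via index-scanning helper functions while incrementing a counter.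
import Mathlib
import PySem

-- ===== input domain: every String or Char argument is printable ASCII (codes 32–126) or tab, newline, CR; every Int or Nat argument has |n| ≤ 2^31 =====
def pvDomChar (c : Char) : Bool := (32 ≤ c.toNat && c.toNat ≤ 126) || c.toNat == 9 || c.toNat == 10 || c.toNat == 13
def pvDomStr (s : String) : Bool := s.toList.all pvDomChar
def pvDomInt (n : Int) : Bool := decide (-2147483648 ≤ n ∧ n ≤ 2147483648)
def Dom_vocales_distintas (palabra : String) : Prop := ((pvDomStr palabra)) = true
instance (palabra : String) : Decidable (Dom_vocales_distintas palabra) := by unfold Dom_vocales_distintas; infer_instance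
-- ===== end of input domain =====

-- B replaces A's shrinking vowel-list + counter loop (with its two index-scanning helpers)
-- by a set of the word's distinct vowels compared against 3 (idiomatic; return value unchanged).

-- ===== PORT A =====
def pertenece2 (e : Char) (s : List Char) : Bool :=
  (PySem.List.pyRange 0 (s.length : Int) 1).foldl
    (fun acc i => acc || (PySem.List.pyGetD s i ' ' == e)) false

def sacar_elemento (lista : List Char) (letra : Char) : List Char :=
  (PySem.List.pyRange 0 (lista.length : Int) 1).foldl
    (fun acc i => if PySem.List.pyGetD lista i ' ' != letra
                  then acc ++ [PySem.List.pyGetD lista i ' '] else acc) []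

def vocales_distintas (palabra : String) : Bool :=
  let r := palabra.toList.foldl
    (fun (st : List Char × Int) letra =>
      if pertenece2 letra st.1 then (sacar_elemento st.1 letra, st.2 + 1) else st)
    (['a','e','i','o','u','A','E','I','O','U'], 0)
  decide (r.2 ≥ 3)

-- ===== PORT B =====
def vocales_distintas_alt (palabra : String) : Bool :=
  let vocales : PySem.Set Char := PySem.Set.ofList "aeiouAEIOU".toList
  decide (3 ≤ PySem.Set.len (PySem.Set.ofList
    (palabra.toList.filter (fun c => PySem.Set.contains vocales c))))

-- ===== PRECONDITION & SPEC =====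
def Spec_vocales_distintas (palabra : String) (out : Bool) : Prop := out = vocales_distintas_alt palabra
instance (palabra : String) (out : Bool) : Decidable (Spec_vocales_distintas palabra out) := by unfold Spec_vocales_distintas; infer_instance

-- ===== CLAIM (what is proved, stated in full; the proofs are below) =====
def Claim_equal_vocales_distintas : Prop := ∀ (palabra : String), Dom_vocales_distintas palabra → Spec_vocales_distintas palabra (vocales_distintas palabra)

-- ===== LEMMAS AND PROOFS =====

-- A's index-scanning membership helper is Boolean 'any'
lemma foldl_or_any (s : List Char) (e : Char) (acc : Bool) :
    s.foldl (fun a c => a || (c == e)) acc = (acc || s.any (· == e)) := by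
  induction s generalizing acc with
  | nil => simp
  | cons c cs ih => simp [List.foldl_cons, ih, Bool.or_assoc]

lemma pertenece2_eq_any (e : Char) (s : List Char) :
    pertenece2 e s = s.any (· == e) := by
  unfold pertenece2
  rw [PySem.List.foldl_pyRange_zero_pyGetD' s ' ' (fun a c => a || (c == e)) false,
      foldl_or_any]
  simp

-- A's element-removal helper is 'filter'
lemma sacar_elemento_eq_filter (l : List Char) (a : Char) :
    sacar_elemento l a = l.filter (· != a) := by
  unfold sacar_elemento
  rw [PySem.List.foldl_pyRange_zero_pyGetD' l ' '
        (fun acc c => if c != a then acc ++ [c] else acc) []]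
  simpa using PySem.List.foldl_append_if (fun c => c != a) (fun c => c) l []

-- counting vowels occurring in c :: cs splits off the (unique) occurrence of c
lemma count_cons_mem (vocs cs : List Char) (c : Char)
    (hnd : vocs.Nodup) (hc : c ∈ vocs) :
    (vocs.filter (fun v => (c :: cs).contains v)).length
      = 1 + ((vocs.filter (fun v => v != c)).filter (fun v => cs.contains v)).length := by
  induction vocs with
  | nil => cases hc
  | cons v vs ih =>
    rcases List.mem_cons.mp hc with h | h
    · subst h
      have hnotin : c ∉ vs := (List.nodup_cons.mp hnd).1
      have hx' : ∀ x ∈ vs, ((c :: cs).contains x) = cs.contains x := by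
        intro x hx
        have hxc : (x == c) = false :=
          beq_eq_false_iff_ne.mpr (fun he => hnotin (he ▸ hx))
        rw [List.contains_cons, hxc, Bool.false_or]
      have hxne : ∀ x ∈ vs, (x != c) = true := by
        intro x hx; simp only [bne_iff_ne, ne_eq]; intro he; exact hnotin (he ▸ hx)
      have h1 : ((c :: cs).contains c) = true := by simp
      have h2 : (c != c) = false := by simp
      simp only [List.filter_cons, h1, h2, if_true, if_false, Bool.false_eq_true,
        List.length_cons]
      rw [List.filter_eq_self.mpr hxne, List.filter_congr hx', Nat.add_comm]
    · have hc' : c ∈ vs := h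
      have hvc : v ≠ c := fun he => (List.nodup_cons.mp hnd).1 (he ▸ hc')
      have ih' := ih (List.nodup_cons.mp hnd).2 hc'
      have h2 : ((c :: cs).contains v) = cs.contains v := by
        rw [List.contains_cons, beq_eq_false_iff_ne.mpr hvc, Bool.false_or]
      have h3 : (v != c) = true := by simp [hvc]
      simp only [List.filter_cons, h2, h3, if_true]
      by_cases hcs : cs.contains v = true
      · simp only [hcs, if_true, List.length_cons]
        omega
      · simp only [Bool.not_eq_true] at hcs
        simp only [hcs, Bool.false_eq_true, if_false]
        exact ih'

-- A's fold counts, for each element of its (nodup) vowel list, whether it occurs in the word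
lemma foldA_snd (cs : List Char) (vocs : List Char) (n : Int) (hnd : vocs.Nodup) :
    (cs.foldl
      (fun (st : List Char × Int) letra =>
        if pertenece2 letra st.1 then (sacar_elemento st.1 letra, st.2 + 1) else st)
      (vocs, n)).2 = n + ((vocs.filter (fun v => cs.contains v)).length : Int) := by
  induction cs generalizing vocs n with
  | nil => simp
  | cons c cs ih =>
    rw [List.foldl_cons, pertenece2_eq_any, sacar_elemento_eq_filter]
    by_cases hc : vocs.any (· == c) = true
    · have hcm : c ∈ vocs := by
        obtain ⟨x, hx, he⟩ := List.any_eq_true.mp hc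
        exact (beq_iff_eq.mp he) ▸ hx
      rw [if_pos hc, ih _ _ (hnd.filter _), count_cons_mem vocs cs c hnd hcm]
      push_cast; ring
    · have hcm : c ∉ vocs := by
        intro hm; exact hc (List.any_eq_true.mpr ⟨c, hm, by simp⟩)
      rw [if_neg hc, ih _ _ hnd]
      have heq : vocs.filter (fun v => (c :: cs).contains v)
          = vocs.filter (fun v => cs.contains v) :=
        List.filter_congr (fun x hx => by
          have h0 : (x == c) = false := beq_eq_false_iff_ne.mpr (fun he => hcm (he ▸ hx))
          rw [List.contains_cons, h0, Bool.false_or])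
      rw [heq]

-- the distinct vowels of cs and the elements of (nodup) V occurring in cs are equinumerous
lemma len_ofList_filter (cs V : List Char) (hV : V.Nodup) :
    (PySem.Set.ofList (cs.filter (fun c => V.contains c))).length
      = (V.filter (fun v => cs.contains v)).length := by
  refine ((List.perm_ext_iff_of_nodup (PySem.Set.nodup_ofList _)
    (hV.filter _)).mpr ?_).length_eq
  intro a
  simp only [PySem.Set.mem_ofList, List.mem_filter, List.contains_iff_mem]
  tauto

-- ===== VERDICT (by name: the statement is the Claim_ definition above) =====
theorem vocales_distintas_spec : Claim_equal_vocales_distintas := by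
  intro palabra _
  unfold Spec_vocales_distintas
  simp only [vocales_distintas, vocales_distintas_alt]
  rw [foldA_snd palabra.toList (['a','e','i','o','u','A','E','I','O','U']) 0 (by decide)]
  rw [show PySem.Set.ofList "aeiouAEIOU".toList
        = (['a','e','i','o','u','A','E','I','O','U'] : List Char) from by decide]
  simp only [PySem.Set.contains, PySem.Set.len, ge_iff_le, decide_eq_decide]
  rw [len_ofList_filter palabra.toList _ (by decide)]
  omega
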